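-- pv_equiv track=rewrite | github.com/agimus-project/video_guided_tamp_planner | preprocessing/preproc_utils.py | get_all_contacts
-- ===== SOURCE A (Python) =====
-- def get_all_contacts(contacts_per_object, base_value=None):
--     video_len = len(contacts_per_object[list(contacts_per_object.keys())[0]])
--     if base_value is None:
--         combined_contacts = [
--             0
--             if sum([0 if x[i] is None else 1 for k, x in contacts_per_object.items()])
--             == 0
--             else 1
--             for i in range(video_len)
--         ]
--     else:
--         combined_contacts = [
--             0
--             if sum(
--                 [0 if x[i] == base_value else 1 for k, x in contacts_per_object.items()]
--             )
--             == 0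
--             else 1
--             for i in range(video_len)
--         ]
--     return combined_contacts
-- ===== SOURCE B (Python) =====
-- def get_all_contacts(contacts_per_object, base_value=None):
--     timelines = list(contacts_per_object.values())
--     video_len = len(timelines[0])
--     combined_contacts = [0] * video_len
--     for x in timelines:
--         for i in range(video_len):
--             if (x[i] is not None) if base_value is None else (x[i] != base_value):
--                 combined_contacts[i] = 1
--     return combined_contacts
-- ===== Notes on version B (the rewrite author's own statement) =====
-- stated objective: alternative
-- what changed: A builds each frame's flag by re-scanning every object and comparing a per-frame sum with 0; B OR-accumulates each object's timeline into a preallocated 0-mask (object-outer, frame-inner), never forming sums.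
import Mathlib
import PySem

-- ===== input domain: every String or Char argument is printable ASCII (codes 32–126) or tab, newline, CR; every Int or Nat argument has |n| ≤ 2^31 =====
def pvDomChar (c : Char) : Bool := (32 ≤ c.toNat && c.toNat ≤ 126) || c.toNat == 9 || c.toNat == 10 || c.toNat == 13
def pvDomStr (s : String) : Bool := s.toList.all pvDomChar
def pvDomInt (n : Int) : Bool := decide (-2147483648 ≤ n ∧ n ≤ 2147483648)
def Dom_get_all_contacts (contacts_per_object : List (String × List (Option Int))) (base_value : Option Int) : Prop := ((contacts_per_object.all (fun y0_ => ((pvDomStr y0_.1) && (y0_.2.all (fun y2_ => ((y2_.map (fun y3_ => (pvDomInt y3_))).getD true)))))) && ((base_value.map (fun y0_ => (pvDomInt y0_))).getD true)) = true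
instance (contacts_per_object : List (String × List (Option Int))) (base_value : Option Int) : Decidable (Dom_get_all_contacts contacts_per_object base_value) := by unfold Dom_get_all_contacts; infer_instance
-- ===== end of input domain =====

-- B replaces A's frame-outer sum-and-compare by an object-outer OR-accumulation into a 0-mask (alternative decomposition, same cost).


-- ===== PORT A =====
-- count of one object's frame-i cell in A's per-frame sum, base_value = None branch
def pvCountNone (x : List (Option Int)) (i : Int) : Int :=
  match PySem.List.pyGet? x i with
  | some none => 0          -- x[i] is None
  | some (some _) => 1
  | none => 0               -- x[i] raises IndexError in Python; excluded by Pre_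
-- count of one object's frame-i cell in A's per-frame sum, base_value = int branch
def pvCountBase (b : Int) (x : List (Option Int)) (i : Int) : Int :=
  match PySem.List.pyGet? x i with
  | some v => if v = some b then 0 else 1
  | none => 0               -- IndexError; excluded by Pre_

def get_all_contacts (contacts_per_object : List (String × List (Option Int))) (base_value : Option Int) : List Int :=
  match contacts_per_object with
  | [] => []                -- list(keys())[0] raises IndexError in Python; excluded by Pre_
  | (_, x0) :: _ =>
    let video_len : Int := x0.length
    match base_value with
    | none =>
      (PySem.List.pyRange 0 video_len 1).map (fun i =>
        if contacts_per_object.foldl (fun s p => s + pvCountNone p.2 i) 0 = 0 then (0:Int) else 1)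
    | some b =>
      (PySem.List.pyRange 0 video_len 1).map (fun i =>
        if contacts_per_object.foldl (fun s p => s + pvCountBase b p.2 i) 0 = 0 then (0:Int) else 1)

-- ===== PORT B =====
-- B's branch condition: '(x[i] is not None) if base_value is None else (x[i] != base_value)'
def pvHitB (base_value : Option Int) (x : List (Option Int)) (i : Nat) : Bool :=
  match base_value with
  | none =>
    match PySem.List.pyGet? x (Int.ofNat i) with
    | some none => false
    | some (some _) => true
    | none => false         -- IndexError; excluded by Pre_
  | some b =>
    match PySem.List.pyGet? x (Int.ofNat i) with
    | some v => decide (v ≠ some b)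
    | none => false         -- IndexError; excluded by Pre_

def get_all_contacts_alt (contacts_per_object : List (String × List (Option Int))) (base_value : Option Int) : List Int :=
  match contacts_per_object with
  | [] => []                -- timelines[0] raises IndexError in Python; excluded by Pre_
  | (_, x0) :: _ =>
    contacts_per_object.foldl
      (fun acc p => acc.mapIdx (fun i v => if pvHitB base_value p.2 i then 1 else v))
      (List.replicate x0.length (0:Int))

-- ===== PRECONDITION & SPEC =====
-- Pre_ excludes (a) inputs on which the Python A raises IndexError: an empty dict, or an object timeline
-- shorter than the first object's; and (b) association lists with duplicate keys, which a Python dict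
-- cannot hold, so their list-level behaviour is an artefact of the representation.
def Pre_get_all_contacts (contacts_per_object : List (String × List (Option Int))) (base_value : Option Int) : Prop :=
  contacts_per_object ≠ [] ∧
  (contacts_per_object.map Prod.fst).Nodup ∧
  ∀ p ∈ contacts_per_object, ((contacts_per_object.headD ("", [])).2).length ≤ p.2.length
instance (contacts_per_object : List (String × List (Option Int))) (base_value : Option Int) : Decidable (Pre_get_all_contacts contacts_per_object base_value) := by unfold Pre_get_all_contacts; infer_instance

def pvWitness_get_all_contacts : (List (String × List (Option Int))) × Option Int :=
  ([("a", [some 1, none]), ("b", [none, some 2])], none)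

def Spec_get_all_contacts (contacts_per_object : List (String × List (Option Int))) (base_value : Option Int) (out : List Int) : Prop := out = get_all_contacts_alt contacts_per_object base_value
instance (contacts_per_object : List (String × List (Option Int))) (base_value : Option Int) (out : List Int) : Decidable (Spec_get_all_contacts contacts_per_object base_value out) := by unfold Spec_get_all_contacts; infer_instance

-- ===== CLAIM (what is proved, stated in full; the proofs are below) =====
def Claim_equal_get_all_contacts : Prop := ∀ (contacts_per_object : List (String × List (Option Int))) (base_value : Option Int), Dom_get_all_contacts contacts_per_object base_value → Pre_get_all_contacts contacts_per_object base_value → Spec_get_all_contacts contacts_per_object base_value (get_all_contacts contacts_per_object base_value)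

-- ===== LEMMAS AND PROOFS =====

-- unified 0/1 count: both of A's per-object counts are 'if pvHitB then 1 else 0' at a Nat index
theorem pvCountNone_eq_hit (x : List (Option Int)) (i : Nat) :
    pvCountNone x (Int.ofNat i) = if pvHitB none x i then 1 else 0 := by
  unfold pvCountNone pvHitB
  rcases h : PySem.List.pyGet? x (Int.ofNat i) with _ | (_ | v) <;> simp

theorem pvCountBase_eq_hit (b : Int) (x : List (Option Int)) (i : Nat) :
    pvCountBase b x (Int.ofNat i) = if pvHitB (some b) x i then 1 else 0 := by
  unfold pvCountBase pvHitB
  rcases h : PySem.List.pyGet? x (Int.ofNat i) with _ | v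
  · simp
  · by_cases hv : v = some b <;> simp [hv]

-- a sum of 0/1 terms is 0 iff no term is 1
theorem sum_hit_zero_iff (l : List (String × List (Option Int))) (hit : (String × List (Option Int)) → Bool) :
    ((l.map (fun p => if hit p then (1:Int) else 0)).sum = 0) ↔ (l.any hit = false) := by
  induction l with
  | nil => simp
  | cons p t ih =>
    have hnn : 0 ≤ (t.map (fun p => if hit p then (1:Int) else 0)).sum := by
      apply List.sum_nonneg; intro x hx
      simp only [List.mem_map] at hx
      obtain ⟨q, _, rfl⟩ := hx
      split <;> omega
    by_cases hp : hit p = true <;> simp [hp, ih] <;> omega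

-- A's per-frame sum-and-compare equals the OR of the 0/1 hits
theorem frame_eq (l : List (String × List (Option Int)))
    (hit : (String × List (Option Int)) → Bool) (cnt : (String × List (Option Int)) → Int)
    (hc : ∀ p ∈ l, cnt p = if hit p then 1 else 0) :
    (if l.foldl (fun s p => s + cnt p) 0 = 0 then (0:Int) else 1) = if l.any hit then 1 else 0 := by
  rw [PySem.List.foldl_add, zero_add, List.map_congr_left hc]
  rcases h : l.any hit with _ | _
  · rw [if_pos ((sum_hit_zero_iff l hit).mpr h)]; simp
  · rw [if_neg, if_pos rfl]
    intro hz
    have := (sum_hit_zero_iff l hit).mp hz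
    simp [h] at this

-- B's accumulator: length is preserved by the fold
theorem foldB_length (bv : Option Int) (l : List (String × List (Option Int))) (acc : List Int) :
    (l.foldl (fun acc p => acc.mapIdx (fun i v => if pvHitB bv p.2 i then 1 else v)) acc).length
      = acc.length := by
  induction l generalizing acc with
  | nil => rfl
  | cons p t ih =>
    simp only [List.foldl_cons]
    rw [ih, List.length_mapIdx]

-- B's accumulator: element i of the fold result
theorem foldB_get (bv : Option Int) (l : List (String × List (Option Int))) (acc : List Int)
    (i : Nat) (hi : i < acc.length) :
    (l.foldl (fun acc p => acc.mapIdx (fun i v => if pvHitB bv p.2 i then 1 else v)) acc)[i]'(by rw [foldB_length]; exact hi)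
      = if l.any (fun p => pvHitB bv p.2 i) then 1 else acc[i]'hi := by
  induction l generalizing acc with
  | nil => simp
  | cons p t ih =>
    simp only [List.foldl_cons, List.any_cons]
    rw [ih (acc.mapIdx (fun i v => if pvHitB bv p.2 i then 1 else v)) (by simpa using hi)]
    by_cases hp : pvHitB bv p.2 i = true <;>
      by_cases ht : t.any (fun p => pvHitB bv p.2 i) = true <;>
        simp [hp, ht]

-- ===== VERDICT =====
theorem get_all_contacts_spec : Claim_equal_get_all_contacts := by
  intro cpo bv _hdom hpre
  obtain ⟨hne, _hnd, _hlen⟩ := hpre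
  unfold Spec_get_all_contacts
  match cpo, hne with
  | (k0, x0) :: rest, _ =>
    apply List.ext_getElem
    · rw [show get_all_contacts_alt ((k0, x0) :: rest) bv
          = ((k0, x0) :: rest).foldl
              (fun acc p => acc.mapIdx (fun i v => if pvHitB bv p.2 i then 1 else v))
              (List.replicate x0.length (0:Int)) from rfl, foldB_length]
      cases bv <;> simp [get_all_contacts, PySem.List.length_pyRange_one]
    · intro i hiA hiB
      have hi : i < x0.length := by
        have := hiA
        cases bv <;> simp [get_all_contacts, PySem.List.length_pyRange_one] at this <;> exact this
      have hrep : i < (List.replicate x0.length (0:Int)).length := by simpa using hi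
      have hBget : (get_all_contacts_alt ((k0, x0) :: rest) bv)[i]'hiB
          = if ((k0, x0) :: rest).any (fun p => pvHitB bv p.2 i) then 1 else 0 := by
        have := foldB_get bv ((k0, x0) :: rest) (List.replicate x0.length (0:Int)) i hrep
        simpa using this
      rw [hBget]
      have hrange : (PySem.List.pyRange 0 (x0.length : Int) 1)[i]'(by
            rw [PySem.List.length_pyRange_one]; simpa using hi) = (0 : Int) + (i : Nat) :=
        PySem.List.getElem_pyRange_one _ _ _ _
      cases bv with
      | none =>
        have hA : (get_all_contacts ((k0, x0) :: rest) none)[i]'hiA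
            = if ((k0, x0) :: rest).foldl (fun s p => s + pvCountNone p.2 (Int.ofNat i)) 0 = 0
              then (0:Int) else 1 := by
          simp only [get_all_contacts, List.getElem_map]
          rw [hrange]; norm_num
        rw [hA]
        exact frame_eq _ _ _ (fun p _ => pvCountNone_eq_hit p.2 i)
      | some b =>
        have hA : (get_all_contacts ((k0, x0) :: rest) (some b))[i]'hiA
            = if ((k0, x0) :: rest).foldl (fun s p => s + pvCountBase b p.2 (Int.ofNat i)) 0 = 0
              then (0:Int) else 1 := by
          simp only [get_all_contacts, List.getElem_map]
          rw [hrange]; norm_num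
        rw [hA]
        exact frame_eq _ _ _ (fun p _ => pvCountBase_eq_hit b p.2 i)
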